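-- pv_equiv track=rewrite | github.com/jomof/cloze-data | resources/grammar/toposort.py | find_best_insertion_position
-- ===== SOURCE A (Python) =====
-- from typing import List, Dict, Set, Tuple, Any, Optional
-- from typing import List, Dict, Set, Tuple, Any, Optional
--
-- def find_best_insertion_position(
--     current_list: List[str],
--     node: str,
--     nodes_dict: Dict[str, Dict[str, List[str]]],
--     before_field: str,
--     after_field: str,
--     strategy: str
-- ) -> int:
--     """Find the best position to insert a missing node."""
--
--     if strategy == "end":
--         return len(current_list)
--
--     constraints = nodes_dict.get(node, {})
--     before_items = set(constraints.get(before_field, []))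
--     after_items = set(constraints.get(after_field, []))
--
--     # Find constraints that exist in current list
--     before_positions = [i for i, item in enumerate(current_list) if item in before_items]
--     after_positions = [i for i, item in enumerate(current_list) if item in after_items]
--
--     if strategy == "constraint_based":
--         # Insert after the latest "before" item and before the earliest "after" item
--         min_pos = max(before_positions) + 1 if before_positions else 0
--         max_pos = min(after_positions) if after_positions else len(current_list)
--         return min(min_pos, max_pos)
--
--     else:  # "best_position"
--         # Score each position based on how many constraints it satisfies
--         best_pos = 0
--         best_score = -1
--
--         for pos in range(len(current_list) + 1):
--             score = 0
--
--             # Check how many before/after constraints this position satisfies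
--             for i, item in enumerate(current_list):
--                 if item in before_items and i < pos:
--                     score += 1
--                 elif item in after_items and i >= pos:
--                     score += 1
--
--             if score > best_score:
--                 best_score = score
--                 best_pos = pos
--
--         return best_pos
-- ===== SOURCE B (Python) =====
-- def find_best_insertion_position(
--     current_list,
--     node,
--     nodes_dict,
--     before_field,
--     after_field,
--     strategy
-- ):
--     """Find the best position to insert a missing node (single-pass version)."""
--
--     if strategy == "end":
--         return len(current_list)
--
--     constraints = nodes_dict.get(node, {})
--     before_items = set(constraints.get(before_field, []))
--     after_items = set(constraints.get(after_field, []))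
--
--     if strategy == "constraint_based":
--         # One pass: position after the last "before" item, position of the first "after" item.
--         min_pos = 0
--         max_pos = len(current_list)
--         for i, item in enumerate(current_list):
--             if item in before_items:
--                 min_pos = i + 1
--             if item in after_items and max_pos == len(current_list):
--                 max_pos = i
--         return min(min_pos, max_pos)
--
--     else:  # "best_position"
--         # score(pos) = #before items left of pos + #after items at/right of pos.
--         # Maintain it incrementally: score(pos+1) = score(pos) + [x_pos in before] - [x_pos in after].
--         score = sum(1 for item in current_list if item in after_items)
--         best_pos = 0
--         best_score = score
--         for i, item in enumerate(current_list):
--             score += (1 if item in before_items else 0) - (1 if item in after_items else 0)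
--             if score > best_score:
--                 best_score = score
--                 best_pos = i + 1
--         return best_pos
-- ===== Notes on version B (the rewrite author's own statement) =====
-- stated objective: faster
-- what changed: The best_position branch rescans the whole list for every candidate position (O(n^2)); B maintains the position score incrementally in one pass (score(pos+1) = score(pos) + [x in before] - [x in after]) while tracking the running maximum, and the constraint_based branch's two comprehensions plus max/min are fused into a single loop.
import Mathlib
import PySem

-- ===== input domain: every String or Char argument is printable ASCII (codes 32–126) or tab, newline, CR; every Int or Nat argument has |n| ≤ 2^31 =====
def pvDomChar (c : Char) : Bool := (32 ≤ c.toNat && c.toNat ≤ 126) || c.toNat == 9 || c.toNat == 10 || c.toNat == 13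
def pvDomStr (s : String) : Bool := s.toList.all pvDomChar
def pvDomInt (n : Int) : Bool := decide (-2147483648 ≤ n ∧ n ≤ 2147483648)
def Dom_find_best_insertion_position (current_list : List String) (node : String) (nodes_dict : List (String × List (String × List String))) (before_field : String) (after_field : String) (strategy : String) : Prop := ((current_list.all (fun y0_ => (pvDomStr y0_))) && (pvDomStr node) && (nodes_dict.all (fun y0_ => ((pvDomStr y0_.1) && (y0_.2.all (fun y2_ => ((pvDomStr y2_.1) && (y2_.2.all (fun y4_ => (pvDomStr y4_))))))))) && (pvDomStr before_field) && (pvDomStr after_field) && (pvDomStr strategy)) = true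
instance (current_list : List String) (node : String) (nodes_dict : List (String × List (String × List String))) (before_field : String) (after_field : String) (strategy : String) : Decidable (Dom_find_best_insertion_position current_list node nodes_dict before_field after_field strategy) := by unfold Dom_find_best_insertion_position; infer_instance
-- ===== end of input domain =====

-- B replaces A's quadratic rescoring of every insertion position by one running-score pass
-- (and fuses the constraint_based min/max search into a single loop); objective: faster.

-- ===== PORT A =====
def find_best_insertion_position (current_list : List String) (node : String) (nodes_dict : List (String × List (String × List String))) (before_field : String) (after_field : String) (strategy : String) : Int :=
  if strategy == "end" then PySem.List.len current_list
  else
    let constraints : List (String × List String) := PySem.Dict.getD (PySem.Dict.ofList nodes_dict) node []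
    let before_items : PySem.Set String := PySem.Set.ofList (PySem.Dict.getD (PySem.Dict.ofList constraints) before_field [])
    let after_items : PySem.Set String := PySem.Set.ofList (PySem.Dict.getD (PySem.Dict.ofList constraints) after_field [])
    let before_positions : List Int := ((PySem.List.enumerate current_list 0).filter (fun p => PySem.Set.contains before_items p.2)).map (·.1)
    let after_positions : List Int := ((PySem.List.enumerate current_list 0).filter (fun p => PySem.Set.contains after_items p.2)).map (·.1)
    if strategy == "constraint_based" then
      let min_pos : Int := if before_positions ≠ [] then ((PySem.List.max? before_positions (fun y => y)).getD 0) + 1 else 0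
      let max_pos : Int := if after_positions ≠ [] then (PySem.List.min? after_positions (fun y => y)).getD 0 else PySem.List.len current_list
      min min_pos max_pos
    else
      let r := (PySem.List.pyRange 0 (PySem.List.len current_list + 1)).foldl (fun (st : Int × Int) pos =>
        let score := (PySem.List.enumerate current_list 0).foldl (fun (s : Int) p =>
          if PySem.Set.contains before_items p.2 ∧ p.1 < pos then s + 1
          else if PySem.Set.contains after_items p.2 ∧ p.1 ≥ pos then s + 1
          else s) 0
        if score > st.2 then (pos, score) else st) (0, -1)
      r.1

-- ===== PORT B =====
def find_best_insertion_position_alt (current_list : List String) (node : String) (nodes_dict : List (String × List (String × List String))) (before_field : String) (after_field : String) (strategy : String) : Int :=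
  if strategy == "end" then PySem.List.len current_list
  else
    let constraints : List (String × List String) := PySem.Dict.getD (PySem.Dict.ofList nodes_dict) node []
    let before_items : PySem.Set String := PySem.Set.ofList (PySem.Dict.getD (PySem.Dict.ofList constraints) before_field [])
    let after_items : PySem.Set String := PySem.Set.ofList (PySem.Dict.getD (PySem.Dict.ofList constraints) after_field [])
    if strategy == "constraint_based" then
      let st := (PySem.List.enumerate current_list 0).foldl (fun (st : Int × Int) p =>
        ((if PySem.Set.contains before_items p.2 then p.1 + 1 else st.1),
         (if PySem.Set.contains after_items p.2 ∧ st.2 = PySem.List.len current_list then p.1 else st.2)))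
        (0, PySem.List.len current_list)
      min st.1 st.2
    else
      let score0 : Int := current_list.foldl (fun (s : Int) x => if PySem.Set.contains after_items x then s + 1 else s) 0
      let r := (PySem.List.enumerate current_list 0).foldl (fun (st : Int × Int × Int) p =>
        let score := st.1 + (if PySem.Set.contains before_items p.2 then 1 else 0)
                          - (if PySem.Set.contains after_items p.2 then 1 else 0)
        if score > st.2.2 then (score, p.1 + 1, score) else (score, st.2.1, st.2.2))
        (score0, 0, score0)
      r.2.1

-- ===== PRECONDITION & SPEC =====
def Spec_find_best_insertion_position (current_list : List String) (node : String) (nodes_dict : List (String × List (String × List String))) (before_field : String) (after_field : String) (strategy : String) (out : Int) : Prop := out = find_best_insertion_position_alt current_list node nodes_dict before_field after_field strategy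
instance (current_list : List String) (node : String) (nodes_dict : List (String × List (String × List String))) (before_field : String) (after_field : String) (strategy : String) (out : Int) : Decidable (Spec_find_best_insertion_position current_list node nodes_dict before_field after_field strategy out) := by unfold Spec_find_best_insertion_position; infer_instance

-- ===== CLAIM (what is proved, stated in full; the proofs are below) =====
def Claim_equal_find_best_insertion_position : Prop := ∀ (current_list : List String) (node : String) (nodes_dict : List (String × List (String × List String))) (before_field : String) (after_field : String) (strategy : String), Dom_find_best_insertion_position current_list node nodes_dict before_field after_field strategy → Spec_find_best_insertion_position current_list node nodes_dict before_field after_field strategy (find_best_insertion_position current_list node nodes_dict before_field after_field strategy)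

-- ===== LEMMAS AND PROOFS =====

-- indices of the (filtered) enumeration, as in A's comprehensions
def pvIdx (b : String → Bool) (xs : List String) (s : Int) : List Int :=
  ((PySem.List.enumerate xs s).filter (fun p => b p.2)).map (·.1)

theorem pvIdx_nil (b : String → Bool) (s : Int) : pvIdx b [] s = [] := rfl

theorem pvIdx_cons (b : String → Bool) (x : String) (xs : List String) (s : Int) :
    pvIdx b (x :: xs) s = (if b x then [s] else []) ++ pvIdx b xs (s + 1) := by
  simp [pvIdx, PySem.List.enumerate_cons, List.filter_cons]
  by_cases h : b x <;> simp [h]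

theorem pvIdx_mem_le (b : String → Bool) :
    ∀ (xs : List String) (s : Int), ∀ y ∈ pvIdx b xs s, s ≤ y := by
  intro xs
  induction xs with
  | nil => intro s y hy; simp [pvIdx_nil] at hy
  | cons x xs ih =>
    intro s y hy
    rw [pvIdx_cons] at hy
    rcases List.mem_append.1 hy with h | h
    · by_cases hb : b x <;> simp [hb] at h; omega
    · have := ih (s + 1) y h; omega

theorem max?_id_cons_of_le (x : Int) (t : List Int) (h : ∀ y ∈ t, x ≤ y) (ht : t ≠ []) :
    PySem.List.max? (x :: t) (fun y => y) = PySem.List.max? t (fun y => y) := by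
  cases t with
  | nil => exact absurd rfl ht
  | cons z t =>
    rw [PySem.List.max?_id_cons, PySem.List.max?_id_cons]
    have hx : x ≤ z := h z (by simp)
    simp [List.foldl_cons, max_eq_right hx]

theorem min?_id_cons_of_le (x : Int) (t : List Int) (h : ∀ y ∈ t, x ≤ y) :
    PySem.List.min? (x :: t) (fun y => y) = some x := by
  rw [PySem.List.min?_id_cons]
  congr 1
  induction t generalizing x with
  | nil => rfl
  | cons z t ih =>
    have hx : x ≤ z := h z (by simp)
    simp [List.foldl_cons, min_eq_left hx]
    exact ih x (fun y hy => h y (by simp [hy]))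

-- B's running "last before-index + 1" loop computes A's max-based min_pos
theorem mn_fold (b : String → Bool) :
    ∀ (xs : List String) (s m : Int),
    (PySem.List.enumerate xs s).foldl (fun m p => if b p.2 then p.1 + 1 else m) m
      = ((PySem.List.max? (pvIdx b xs s) (fun y => y)).map (· + 1)).getD m := by
  intro xs
  induction xs with
  | nil => intro s m; simp [pvIdx_nil, PySem.List.enumerate]; rfl
  | cons x xs ih =>
    intro s m
    rw [PySem.List.enumerate_cons, List.foldl_cons, pvIdx_cons]
    by_cases hb : b x
    · simp only [hb, if_true, List.singleton_append]
      rw [ih (s + 1) (s + 1)]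
      rcases hmx : PySem.List.max? (pvIdx b xs (s + 1)) (fun y => y) with _ | v
      · have hnil := (PySem.List.max?_eq_none_iff (pvIdx b xs (s + 1)) (fun y => y)).1 hmx
        simp [hnil, PySem.List.max?_id_cons]
      · have hnil : pvIdx b xs (s + 1) ≠ [] := by
          intro h0
          rw [h0, (PySem.List.max?_eq_none_iff ([] : List Int) (fun y => y)).2 rfl] at hmx
          cases hmx
        rw [max?_id_cons_of_le s _ (fun y hy => le_of_lt (by have := pvIdx_mem_le b xs (s+1) y hy; omega)) hnil, hmx]
        simp
    · simp only [hb]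
      exact ih (s + 1) m

-- B's flag-guarded "first after-index" loop computes A's min-based max_pos
theorem mx_fold (a : String → Bool) (L : Int) :
    ∀ (xs : List String) (s m : Int), s + xs.length ≤ L →
    (PySem.List.enumerate xs s).foldl (fun m p => if a p.2 ∧ m = L then p.1 else m) m
      = if m = L then (PySem.List.min? (pvIdx a xs s) (fun y => y)).getD L else m := by
  intro xs
  induction xs with
  | nil =>
    intro s m _
    simp only [PySem.List.enumerate, List.foldl_nil, pvIdx_nil]
    by_cases h : m = L
    · simp [h, (PySem.List.min?_eq_none_iff ([] : List Int) (fun y => y)).2 rfl]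
    · simp [h]
  | cons x xs ih =>
    intro s m hs
    rw [PySem.List.enumerate_cons, List.foldl_cons, pvIdx_cons]
    simp only [List.length_cons] at hs
    by_cases hm : m = L
    · by_cases ha : a x
      · have hsL : ¬ (s = L) := by omega
        simp only [ha, hm, and_true, if_pos, List.singleton_append]
        rw [ih (s + 1) s (by omega)]
        rw [min?_id_cons_of_le s _ (fun y hy => le_of_lt (by have := pvIdx_mem_le a xs (s+1) y hy; omega))]
        simp [hsL]
      · simp only [ha, Bool.false_eq_true, false_and, if_false, List.nil_append]
        rw [ih (s + 1) m (by omega)]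
    · by_cases ha : a x
      · simp only [ha, hm, and_false, if_false, List.singleton_append]
        rw [ih (s + 1) m (by omega)]
        simp [hm]
      · simp only [ha, Bool.false_eq_true, false_and, if_false, List.nil_append]
        rw [ih (s + 1) m (by omega)]

-- score of an insertion position: before-items strictly left of it + after-items at/right of it
def pvSc (b a : String → Bool) (cl : List String) (p : Nat) : Int :=
  ((cl.take p).countP b : Int) + ((cl.drop p).countP a : Int)

theorem pvSc_zero (b a : String → Bool) (cl : List String) :
    pvSc b a cl 0 = (cl.countP a : Int) := by simp [pvSc]

theorem pvSc_nonneg (b a : String → Bool) (cl : List String) (p : Nat) : 0 ≤ pvSc b a cl p := by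
  unfold pvSc; positivity

theorem pvSc_succ (b a : String → Bool) (cl : List String) (k : Nat) (hk : k < cl.length) :
    pvSc b a cl (k + 1)
      = pvSc b a cl k + (if b cl[k] then 1 else 0) - (if a cl[k] then 1 else 0) := by
  have ht : (cl.take (k + 1)).countP b = (cl.take k).countP b + (if b cl[k] then 1 else 0) := by
    rw [List.take_succ, List.getElem?_eq_getElem hk]
    simp only [Option.toList_some, List.countP_append, List.countP_cons, List.countP_nil]
    by_cases hb : b cl[k] <;> simp [hb]
  have hd : (cl.drop k).countP a = (if a cl[k] then 1 else 0) + (cl.drop (k + 1)).countP a := by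
    rw [List.drop_eq_getElem_cons hk, List.countP_cons]
    by_cases ha : a cl[k] <;> simp [ha] <;> omega
  unfold pvSc
  rw [ht, hd]
  by_cases hb : b cl[k] <;> by_cases ha : a cl[k] <;> simp [hb, ha] <;> push_cast <;> ring

-- A's inner rescoring loop, when every index is ≥ pos, counts the after-items
theorem inner_ge (b a : String → Bool) :
    ∀ (cl : List String) (s pos acc : Int), pos ≤ s →
    (PySem.List.enumerate cl s).foldl (fun (acc : Int) p =>
        if b p.2 ∧ p.1 < pos then acc + 1
        else if a p.2 ∧ p.1 ≥ pos then acc + 1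
        else acc) acc
      = acc + (cl.countP a : Int) := by
  intro cl
  induction cl with
  | nil => intro s pos acc _; simp [PySem.List.enumerate]
  | cons x xs ih =>
    intro s pos acc h
    rw [PySem.List.enumerate_cons, List.foldl_cons]
    have h1 : ¬ (b x = true ∧ s < pos) := by rintro ⟨_, h2⟩; omega
    by_cases ha : a x
    · have hred : (if b x = true ∧ s < pos then acc + 1 else if a x = true ∧ s ≥ pos then acc + 1 else acc)
          = acc + 1 := by rw [if_neg h1, if_pos ⟨ha, h⟩]
      simp only [hred]
      rw [ih (s + 1) pos (acc + 1) (by omega), List.countP_cons]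
      simp [ha]; push_cast; ring
    · have hred : (if b x = true ∧ s < pos then acc + 1 else if a x = true ∧ s ≥ pos then acc + 1 else acc)
          = acc := by rw [if_neg h1, if_neg (fun hc => ha hc.1)]
      simp only [hred]
      rw [ih (s + 1) pos acc (by omega), List.countP_cons]
      simp [ha]

-- A's inner rescoring loop computes pvSc
theorem inner_main (b a : String → Bool) :
    ∀ (cl : List String) (p : Nat) (s acc pos : Int), pos = s + p →
    (PySem.List.enumerate cl s).foldl (fun (acc : Int) q =>
        if b q.2 ∧ q.1 < pos then acc + 1
        else if a q.2 ∧ q.1 ≥ pos then acc + 1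
        else acc) acc
      = acc + pvSc b a cl p := by
  intro cl
  induction cl with
  | nil => intro p s acc pos _; simp [PySem.List.enumerate, pvSc]
  | cons x xs ih =>
    intro p s acc pos hpos
    cases p with
    | zero =>
      rw [inner_ge b a (x :: xs) s pos acc (by omega)]
      rw [pvSc_zero]
    | succ p =>
      rw [PySem.List.enumerate_cons, List.foldl_cons]
      have hlt : s < pos := by omega
      have hsc : pvSc b a (x :: xs) (p + 1) = (if b x then 1 else 0) + pvSc b a xs p := by
        unfold pvSc
        rw [List.take_succ_cons, List.drop_succ_cons, List.countP_cons]
        by_cases hb : b x <;> simp [hb] <;> push_cast <;> ring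
      by_cases hb : b x
      · have hred : (if b x = true ∧ s < pos then acc + 1 else if a x = true ∧ s ≥ pos then acc + 1 else acc)
            = acc + 1 := by rw [if_pos ⟨hb, hlt⟩]
        simp only [hred]
        rw [ih p (s + 1) (acc + 1) pos (by omega), hsc]
        simp [hb]; ring
      · have hred : (if b x = true ∧ s < pos then acc + 1 else if a x = true ∧ s ≥ pos then acc + 1 else acc)
            = acc := by rw [if_neg (fun hc => hb hc.1), if_neg (fun hc => by omega)]
        simp only [hred]
        rw [ih p (s + 1) acc pos (by omega), hsc]
        simp [hb]

-- the argmax of pvSc over positions 0..k-1, exactly as A's outer loop accumulates it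
def pvArg (b a : String → Bool) (cl : List String) (k : Nat) : Int × Int :=
  (List.range k).foldl (fun (st : Int × Int) p =>
    if pvSc b a cl p > st.2 then ((p : Int), pvSc b a cl p) else st) (0, -1)

theorem pvArg_succ (b a : String → Bool) (cl : List String) (k : Nat) :
    pvArg b a cl (k + 1)
      = if pvSc b a cl k > (pvArg b a cl k).2 then ((k : Int), pvSc b a cl k) else pvArg b a cl k := by
  unfold pvArg
  rw [List.range_succ, List.foldl_append]
  rfl

theorem pvArg_one (b a : String → Bool) (cl : List String) :
    pvArg b a cl 1 = (0, pvSc b a cl 0) := by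
  have h : pvSc b a cl 0 > -1 := by have := pvSc_nonneg b a cl 0; omega
  unfold pvArg
  simp [List.range_succ, h]

-- B's single scan, started at position k with the correct running state, lands on the full argmax
theorem scan_main (b a : String → Bool) (cl : List String) :
    ∀ (suf : List String) (k : Nat), cl.drop k = suf → k ≤ cl.length →
    (PySem.List.enumerate suf (k : Int)).foldl (fun (st : Int × Int × Int) p =>
        let score := st.1 + (if b p.2 then 1 else 0) - (if a p.2 then 1 else 0)
        if score > st.2.2 then (score, p.1 + 1, score) else (score, st.2.1, st.2.2))
      (pvSc b a cl k, (pvArg b a cl (k + 1)).1, (pvArg b a cl (k + 1)).2)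
      = (pvSc b a cl cl.length, (pvArg b a cl (cl.length + 1)).1, (pvArg b a cl (cl.length + 1)).2) := by
  intro suf
  induction suf with
  | nil =>
    intro k hdrop hk
    have : k = cl.length := by
      have := congrArg List.length hdrop; simp at this; omega
    subst this
    simp [PySem.List.enumerate]
  | cons x xs ih =>
    intro k hdrop hk
    have hklt : k < cl.length := by
      have := congrArg List.length hdrop; simp [List.length_drop] at this; omega
    rw [List.drop_eq_getElem_cons hklt] at hdrop
    have hx : cl[k] = x := (List.cons.inj hdrop).1
    have hxs : cl.drop (k + 1) = xs := (List.cons.inj hdrop).2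
    rw [PySem.List.enumerate_cons, List.foldl_cons]
    have hscore : pvSc b a cl k + (if b x then 1 else 0) - (if a x then 1 else 0) = pvSc b a cl (k + 1) := by
      rw [pvSc_succ b a cl k hklt, hx]
    have hrec := ih (k + 1) hxs (by omega)
    by_cases hgt : pvSc b a cl (k + 1) > (pvArg b a cl (k + 1)).2
    · have harg : pvArg b a cl (k + 1 + 1) = (((k + 1 : Nat) : Int), pvSc b a cl (k + 1)) := by
        rw [pvArg_succ]; simp [hgt]
      rw [harg] at hrec
      push_cast at hrec
      simp only [hscore]
      rw [if_pos hgt]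
      exact hrec
    · have harg : pvArg b a cl (k + 1 + 1) = pvArg b a cl (k + 1) := by
        rw [pvArg_succ]; simp [hgt]
      rw [harg] at hrec
      push_cast at hrec
      simp only [hscore]
      rw [if_neg hgt]
      exact hrec

-- A's comprehension/extremum form of the constraint_based branch equals B's single fold
theorem cb_branch (bcon acon : String → Bool) (cl : List String) :
    (let bp : List Int := ((PySem.List.enumerate cl 0).filter (fun p => bcon p.2)).map (·.1)
     let ap : List Int := ((PySem.List.enumerate cl 0).filter (fun p => acon p.2)).map (·.1)
     min (if bp ≠ [] then ((PySem.List.max? bp (fun y => y)).getD 0) + 1 else 0)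
         (if ap ≠ [] then (PySem.List.min? ap (fun y => y)).getD 0 else PySem.List.len cl))
    = (let st := (PySem.List.enumerate cl 0).foldl (fun (st : Int × Int) p =>
         ((if bcon p.2 then p.1 + 1 else st.1),
          (if acon p.2 ∧ st.2 = PySem.List.len cl then p.1 else st.2))) (0, PySem.List.len cl)
       min st.1 st.2) := by
  simp only []
  rw [PySem.List.foldl_prod_mk (f := fun (m : Int) (p : Int × String) => if bcon p.2 then p.1 + 1 else m)
      (g := fun (m : Int) (p : Int × String) => if acon p.2 ∧ m = PySem.List.len cl then p.1 else m)]
  rw [mn_fold bcon cl 0 0]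
  rw [mx_fold acon (PySem.List.len cl) cl 0 (PySem.List.len cl) (by rw [PySem.List.len_eq]; omega)]
  rw [if_pos rfl]
  simp only [pvIdx]
  congr 1
  · rcases hmx : PySem.List.max? (((PySem.List.enumerate cl 0).filter (fun p => bcon p.2)).map (·.1)) (fun y => y) with _ | v
    · rw [if_neg (fun hne => hne ((PySem.List.max?_eq_none_iff _ _).1 hmx))]
      rw [hmx]; rfl
    · have hne : ((PySem.List.enumerate cl 0).filter (fun p => bcon p.2)).map (·.1) ≠ [] := by
        intro h0
        rw [h0, (PySem.List.max?_eq_none_iff ([] : List Int) (fun y => y)).2 rfl] at hmx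
        cases hmx
      rw [if_pos hne]
      rw [hmx]; rfl
  · rcases hmn : PySem.List.min? (((PySem.List.enumerate cl 0).filter (fun p => acon p.2)).map (·.1)) (fun y => y) with _ | v
    · rw [if_neg (fun hne => hne ((PySem.List.min?_eq_none_iff _ _).1 hmn))]
      rw [hmn]; rfl
    · have hne : ((PySem.List.enumerate cl 0).filter (fun p => acon p.2)).map (·.1) ≠ [] := by
        intro h0
        rw [h0, (PySem.List.min?_eq_none_iff ([] : List Int) (fun y => y)).2 rfl] at hmn
        cases hmn
      rw [if_pos hne]
      rw [hmn]; rfl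

-- A's quadratic rescoring loop equals B's single running-score scan
theorem bp_branch (bcon acon : String → Bool) (cl : List String) :
    ((PySem.List.pyRange 0 (PySem.List.len cl + 1)).foldl (fun (st : Int × Int) pos =>
        let score := (PySem.List.enumerate cl 0).foldl (fun (s : Int) p =>
          if bcon p.2 ∧ p.1 < pos then s + 1
          else if acon p.2 ∧ p.1 ≥ pos then s + 1
          else s) 0
        if score > st.2 then (pos, score) else st) (0, -1)).1
    = (let score0 : Int := cl.foldl (fun (s : Int) x => if acon x then s + 1 else s) 0
       ((PySem.List.enumerate cl 0).foldl (fun (st : Int × Int × Int) p =>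
          let score := st.1 + (if bcon p.2 then 1 else 0) - (if acon p.2 then 1 else 0)
          if score > st.2.2 then (score, p.1 + 1, score) else (score, st.2.1, st.2.2))
          (score0, 0, score0)).2.1) := by
  simp only []
  rw [PySem.List.len_eq]
  rw [show ((cl.length : Int) + 1) = ((cl.length + 1 : Nat) : Int) by push_cast; ring]
  rw [PySem.List.pyRange_zero_natCast, List.foldl_map]
  have hfun : (fun (st : Int × Int) (k : Nat) =>
      let score := (PySem.List.enumerate cl 0).foldl (fun (s : Int) p =>
        if bcon p.2 ∧ p.1 < (k : Int) then s + 1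
        else if acon p.2 ∧ p.1 ≥ (k : Int) then s + 1
        else s) 0
      if score > st.2 then (((k : Int)), score) else st)
      = (fun (st : Int × Int) (k : Nat) =>
          if pvSc bcon acon cl k > st.2 then ((k : Int), pvSc bcon acon cl k) else st) := by
    funext st k
    simp only [inner_main bcon acon cl k 0 0 (k : Int) (by push_cast; ring), zero_add]
  rw [hfun]
  rw [PySem.List.foldl_count_if acon cl 0]
  have hsc0 : (0 : Int) + (cl.countP acon : Int) = pvSc bcon acon cl 0 := by
    rw [pvSc_zero]; ring
  rw [hsc0]
  have hmain := scan_main bcon acon cl cl 0 (by simp) (by omega)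
  rw [pvArg_one] at hmain
  simp only [Nat.cast_zero] at hmain
  rw [hmain]
  rfl

-- ===== VERDICT (by name: the statement is the Claim_ definition above) =====
theorem find_best_insertion_position_spec : Claim_equal_find_best_insertion_position := by
  intro current_list node nodes_dict before_field after_field strategy _
  unfold Spec_find_best_insertion_position
  unfold find_best_insertion_position find_best_insertion_position_alt
  by_cases hend : (strategy == "end") = true
  · simp [hend]
  · by_cases hcb : (strategy == "constraint_based") = true
    · simp only [hend, hcb, Bool.false_eq_true, if_false, if_true]
      exact cb_branch _ _ current_list
    · simp only [hend, hcb, Bool.false_eq_true, if_false]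
      exact bp_branch _ _ current_list
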